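-- pv_equiv track=rewrite | github.com/petr-bazant/codecommit | terraform/provisionUpsource.py | constructRepoToUserIdsMap
-- ===== SOURCE A (Python) =====
-- emailToUserIdMap = {}
--
-- def constructRepoToUserIdsMap(userToReposMap, emailToUserIdMap):
--   repoToUsersMap = {}
--   for user in userToReposMap.keys():
--     # Combine the read and write access lists
--     repoCsv = userToReposMap[user][0]
--     if repoCsv != "":
--       repoCsv += ","
--     repoCsv += userToReposMap[user][1]
--     repos = repoCsv.split(",")
--
--     # Loop through all repos assigned to this user
--     for repo in repos:
--       repo = repo.strip()
--       if repo != "":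
--         # Add user to repo, create new user list if first user added to repo
--         users = repoToUsersMap.get(repo)
--         if users == None:
--           users = set([])
--           repoToUsersMap[repo] = users
--         users.add(emailToUserIdMap[user])
--
--   return repoToUsersMap
-- ===== SOURCE B (Python) =====
-- def constructRepoToUserIdsMap(userToReposMap, emailToUserIdMap):
--   # Repo-major (transposed) construction: first reduce each user to (userId, repo tokens),
--   # then compute the repo order, then for each repo scan the rows for its users.
--   rows = []
--   for user in userToReposMap.keys():
--     access = userToReposMap[user]
--     repos = [t for t in map(str.strip, (access[0] + "," + access[1]).split(",")) if t != ""]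
--     if repos != []:
--       rows.append((emailToUserIdMap[user], repos))
--   repoOrder = []
--   for _, repos in rows:
--     for repo in repos:
--       if repo not in repoOrder:
--         repoOrder.append(repo)
--   return {repo: {userId for userId, repos in rows if repo in repos} for repo in repoOrder}
-- ===== Notes on version B (the rewrite author's own statement) =====
-- stated objective: alternative
-- what changed: Replaces A's user-major incremental construction (one pass over users, inserting into a dict of sets as tokens are scanned) with a repo-major transposed design: reduce each user to a (userId, repo-list) row, compute the repo first-occurrence order, then build the result by scanning the rows once per repo to collect that repo's userIds.
import Mathlib
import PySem

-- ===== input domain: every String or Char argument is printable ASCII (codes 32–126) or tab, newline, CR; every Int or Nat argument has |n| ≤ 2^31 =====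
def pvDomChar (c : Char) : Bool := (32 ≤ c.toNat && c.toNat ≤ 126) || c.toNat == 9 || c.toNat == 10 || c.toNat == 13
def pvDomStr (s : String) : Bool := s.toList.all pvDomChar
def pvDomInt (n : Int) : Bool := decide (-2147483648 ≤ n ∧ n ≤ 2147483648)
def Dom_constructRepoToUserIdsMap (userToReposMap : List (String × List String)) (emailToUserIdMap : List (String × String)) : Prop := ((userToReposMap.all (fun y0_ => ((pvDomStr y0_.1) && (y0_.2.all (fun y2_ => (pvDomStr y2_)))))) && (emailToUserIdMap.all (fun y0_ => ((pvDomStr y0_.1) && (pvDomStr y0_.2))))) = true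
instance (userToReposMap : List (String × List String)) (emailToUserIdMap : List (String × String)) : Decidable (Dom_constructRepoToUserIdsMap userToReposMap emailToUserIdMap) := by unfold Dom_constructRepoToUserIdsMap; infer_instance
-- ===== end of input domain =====

-- B replaces A's user-major incremental dict-of-sets construction with a repo-major
-- transposed design (rows of (userId, repo-list), then one scan of the rows per repo);
-- alternative decomposition, not claimed faster.


-- ===== PORT A =====
-- A's '.split(",")' / '.strip()' are ported exactly via PySem.Chars.splitOn / PySem.Chars.strip
-- on the character list (the separator "," is non-empty, so splitOn is the exact total form).
def constructRepoToUserIdsMap (userToReposMap : List (String × List String)) (emailToUserIdMap : List (String × String)) : List (String × List String) :=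
  let uD := PySem.Dict.ofList userToReposMap
  let eD := PySem.Dict.ofList emailToUserIdMap
  let res : PySem.Dict String (PySem.Set String) :=
    uD.keys.foldl (fun acc user =>
      let v := uD.getD user []
      let c0 := PySem.List.pyGetD v 0 ""
      let repoCsv := if c0 ≠ "" then c0 ++ "," else c0
      let repoCsv := repoCsv ++ PySem.List.pyGetD v 1 ""
      let repos := PySem.Chars.splitOn repoCsv.toList [',']
      repos.foldl (fun acc tok =>
        let repo := PySem.Chars.strip tok
        if repo ≠ [] then
          match acc.get? (String.ofList repo) with
          | none => acc.insert (String.ofList repo) (PySem.Set.add PySem.Set.empty (eD.getD user ""))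
          | some users => acc.insert (String.ofList repo) (PySem.Set.add users (eD.getD user ""))
        else acc) acc) PySem.Dict.empty
  res.items

-- ===== PORT B =====
-- B-side helper: the per-user list of stripped non-empty repo tokens
-- ('[t for t in map(str.strip, (access[0] + "," + access[1]).split(",")) if t != ""]').
def pvToks (access : List String) : List String :=
  (((PySem.Chars.splitOn (PySem.List.pyGetD access 0 "" ++ "," ++ PySem.List.pyGetD access 1 "").toList [',']).map
      PySem.Chars.strip).filter (fun t => t ≠ [])).map String.ofList

def constructRepoToUserIdsMap_alt (userToReposMap : List (String × List String)) (emailToUserIdMap : List (String × String)) : List (String × List String) :=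
  let uD := PySem.Dict.ofList userToReposMap
  let eD := PySem.Dict.ofList emailToUserIdMap
  -- rows: one (userId, repo-list) pair per user with a non-empty repo list
  let rows : List (String × List String) :=
    uD.items.foldl (fun rs p =>
      let repos := pvToks p.2
      if repos ≠ [] then rs ++ [(eD.getD p.1 "", repos)] else rs) []
  -- repo first-occurrence order ('if repo not in repoOrder: repoOrder.append(repo)')
  let repoOrder : PySem.Set String :=
    rows.foldl (fun ord row => PySem.Set.update ord row.2) PySem.Set.empty
  -- repo-major grouping: for each repo, scan the rows for the users that have it
  (repoOrder.foldl (fun d repo =>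
      d.insert repo (rows.foldl (fun s row =>
        if row.2.contains repo then PySem.Set.add s row.1 else s) PySem.Set.empty)) PySem.Dict.empty).items

-- ===== PRECONDITION & SPEC =====
-- Pre_ excludes exactly the inputs where Python A raises: an access list with fewer than two
-- entries (IndexError on [0]/[1]) or a user with at least one non-empty repo token who is
-- missing from emailToUserIdMap (KeyError).
def Pre_constructRepoToUserIdsMap (userToReposMap : List (String × List String)) (emailToUserIdMap : List (String × String)) : Prop :=
  ∀ p ∈ (PySem.Dict.ofList userToReposMap).items,
    2 ≤ p.2.length ∧
    ((∃ t ∈ PySem.Chars.splitOn ((PySem.List.pyGetD p.2 0 "").toList ++ ',' :: (PySem.List.pyGetD p.2 1 "").toList) [','],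
        PySem.Chars.strip t ≠ []) →
      (PySem.Dict.ofList emailToUserIdMap).contains p.1 = true)
instance (userToReposMap : List (String × List String)) (emailToUserIdMap : List (String × String)) : Decidable (Pre_constructRepoToUserIdsMap userToReposMap emailToUserIdMap) := by unfold Pre_constructRepoToUserIdsMap; infer_instance
def pvWitness_constructRepoToUserIdsMap : (List (String × List String)) × (List (String × String)) :=
  ([("u@x", ["r1, r2", "r3"]), ("v@x", ["", ""])], [("u@x", "id1")])
def Spec_constructRepoToUserIdsMap (userToReposMap : List (String × List String)) (emailToUserIdMap : List (String × String)) (out : List (String × List String)) : Prop := out = constructRepoToUserIdsMap_alt userToReposMap emailToUserIdMap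
instance (userToReposMap : List (String × List String)) (emailToUserIdMap : List (String × String)) (out : List (String × List String)) : Decidable (Spec_constructRepoToUserIdsMap userToReposMap emailToUserIdMap out) := by unfold Spec_constructRepoToUserIdsMap; infer_instance

-- ===== CLAIM (what is proved, stated in full; the proofs are below) =====
def Claim_equal_constructRepoToUserIdsMap : Prop := ∀ (userToReposMap : List (String × List String)) (emailToUserIdMap : List (String × String)), Dom_constructRepoToUserIdsMap userToReposMap emailToUserIdMap → Pre_constructRepoToUserIdsMap userToReposMap emailToUserIdMap → Spec_constructRepoToUserIdsMap userToReposMap emailToUserIdMap (constructRepoToUserIdsMap userToReposMap emailToUserIdMap)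

-- ===== LEMMAS AND PROOFS =====

-- A's grouping step (get?, create-set-if-absent, add) as a standalone function.
def pvStepA (acc : PySem.Dict String (PySem.Set String)) (pr : String × String) : PySem.Dict String (PySem.Set String) :=
  match acc.get? pr.1 with
  | none => acc.insert pr.1 (PySem.Set.add PySem.Set.empty pr.2)
  | some users => acc.insert pr.1 (PySem.Set.add users pr.2)

-- pvStepA is an insert of the extended set at the key.
theorem pvStepA_getD (acc : PySem.Dict String (PySem.Set String)) (pr : String × String) :
    pvStepA acc pr = acc.insert pr.1 (PySem.Set.add (acc.getD pr.1 PySem.Set.empty) pr.2) := by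
  unfold pvStepA
  rw [PySem.Dict.getD_eq_get?_getD]
  cases acc.get? pr.1 <;> rfl

theorem pvStepA_funext : pvStepA = fun acc pr => acc.insert pr.1 (PySem.Set.add (acc.getD pr.1 PySem.Set.empty) pr.2) :=
  funext fun a => funext fun b => pvStepA_getD a b

-- The (repo, userId) pairs a single user's token list contributes, in order.
def pvPairs (uid : String) (toks : List (List Char)) : List (String × String) :=
  toks.filterMap (fun t =>
    if PySem.Chars.strip t ≠ [] then some (String.ofList (PySem.Chars.strip t), uid) else none)

theorem pvPairs_cons (uid : String) (t : List Char) (ts : List (List Char)) :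
    pvPairs uid (t :: ts)
      = if PySem.Chars.strip t ≠ [] then
          (String.ofList (PySem.Chars.strip t), uid) :: pvPairs uid ts
        else pvPairs uid ts := by
  unfold pvPairs
  rw [List.filterMap_cons]
  by_cases h : PySem.Chars.strip t ≠ []
  · rw [if_pos h, if_pos h]
  · rw [if_neg h, if_neg h]

theorem pvPairs_nil_tok (uid : String) (toks : List (List Char)) :
    pvPairs uid ([] :: toks) = pvPairs uid toks := by
  rw [pvPairs_cons]
  have h : PySem.Chars.strip ([] : List Char) = [] := by decide
  simp [h]

-- pvPairs is B's token list paired with the userId.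
theorem pvPairs_eq_map (uid : String) (toks : List (List Char)) :
    pvPairs uid toks
      = (((toks.map PySem.Chars.strip).filter (fun t => t ≠ [])).map String.ofList).map
          (fun r => (r, uid)) := by
  induction toks with
  | nil => rfl
  | cons t ts ih =>
    rw [pvPairs_cons, List.map_cons, List.filter_cons]
    by_cases h : PySem.Chars.strip t ≠ []
    · rw [if_pos h]; simp [h, ih]
    · rw [if_neg h]; simp [h, ih]

-- A's inner token loop is a fold of pvStepA over the user's pair list.
theorem pvInnerA (uid : String) : ∀ (toks : List (List Char)) (acc : PySem.Dict String (PySem.Set String)),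
    toks.foldl (fun acc tok =>
        if PySem.Chars.strip tok ≠ [] then pvStepA acc (String.ofList (PySem.Chars.strip tok), uid) else acc) acc
      = (pvPairs uid toks).foldl pvStepA acc := by
  intro toks
  induction toks with
  | nil => intro acc; rfl
  | cons t ts ih =>
    intro acc
    simp only [List.foldl_cons]
    by_cases h : PySem.Chars.strip t ≠ []
    · rw [if_pos h, ih, pvPairs_cons, if_pos h, List.foldl_cons]
    · rw [if_neg h, ih, pvPairs_cons, if_neg h]

-- splitOn.go is accumulator-linear.
theorem pv_go_acc (sep : List Char) : ∀ (fuel : Nat) (l cur : List Char) (acc : List (List Char)),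
    PySem.Chars.splitOn.go sep fuel l cur acc = acc.reverse ++ PySem.Chars.splitOn.go sep fuel l cur [] := by
  intro fuel
  induction fuel with
  | zero => intro l cur acc; simp [PySem.Chars.splitOn.go]
  | succ n ih =>
    intro l cur acc
    cases l with
    | nil => simp [PySem.Chars.splitOn.go]
    | cons c rest =>
      rw [PySem.Chars.splitOn.go, PySem.Chars.splitOn.go]
      by_cases h : sep.isPrefixOf (c :: rest) = true
      · simp only [h, if_true]
        rw [ih _ _ (cur.reverse :: acc), ih _ _ [cur.reverse]]
        simp
      · simp only [h]
        exact ih _ _ acc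

theorem pv_splitOn_comma_cons (l : List Char) :
    PySem.Chars.splitOn (',' :: l) [','] = [] :: PySem.Chars.splitOn l [','] := by
  rw [PySem.Chars.splitOn, PySem.Chars.splitOn]
  show PySem.Chars.splitOn.go [','] (l.length + 1 + 1) (',' :: l) [] [] = _
  rw [PySem.Chars.splitOn.go]
  simp only [List.isPrefixOf, List.length, show ((',' == ',') && true) = true from by decide,
    if_true, List.drop, List.reverse_nil]
  rw [pv_go_acc]
  simp

-- A's conditional comma-concatenation yields the same pair list as B's unconditional one.
theorem pvPairs_csv (c0 c1 uid : String) :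
    pvPairs uid (PySem.Chars.splitOn ((if c0 ≠ "" then c0 ++ "," else c0).toList ++ c1.toList) [','])
      = pvPairs uid (PySem.Chars.splitOn (c0.toList ++ ',' :: c1.toList) [',']) := by
  have hc : ("," : String).toList = [','] := by decide
  by_cases h : c0 = ""
  · subst h
    simp only [ne_eq, not_true_eq_false, if_false]
    have h0 : ("" : String).toList = [] := by decide
    rw [h0]
    simp only [List.nil_append]
    rw [pv_splitOn_comma_cons, pvPairs_nil_tok]
  · rw [if_pos h, String.toList_append, hc, List.append_assoc, List.singleton_append]

-- One row's contribution to A's grouping fold.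
def pvStep2 (acc : PySem.Dict String (PySem.Set String)) (row : String × List String) : PySem.Dict String (PySem.Set String) :=
  (row.2.map (fun r => (r, row.1))).foldl pvStepA acc

-- INNER lemmas: one row through the grouping fold.
theorem pvStep2_getD (uid r : String) : ∀ (ts : List String) (acc : PySem.Dict String (PySem.Set String)),
    (pvStep2 acc (uid, ts)).getD r PySem.Set.empty
      = if ts.contains r then PySem.Set.add (acc.getD r PySem.Set.empty) uid else acc.getD r PySem.Set.empty := by
  intro ts
  induction ts with
  | nil => intro acc; rfl
  | cons t ts ih =>
    intro acc
    unfold pvStep2 at ih ⊢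
    simp only [List.map_cons, List.foldl_cons, List.contains_cons]
    rw [ih]
    by_cases h : t = r
    · subst h
      simp only [beq_self_eq_true, Bool.true_or, if_true]
      by_cases hm : ts.contains t
      · rw [if_pos hm]
        rw [pvStepA_getD, PySem.Dict.getD_insert_self]
        rw [PySem.Set.add_eq_ite, if_pos (by
          rw [PySem.Set.add_eq_ite]
          by_cases hu : uid ∈ acc.getD t PySem.Set.empty
          · rw [if_pos hu]; exact hu
          · rw [if_neg hu]; exact List.mem_append_right _ (List.mem_singleton_self uid))]
      · rw [if_neg hm]
        rw [pvStepA_getD, PySem.Dict.getD_insert_self]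
    · have hb : (r == t) = false := by simp [Ne.symm h]
      simp only [hb, Bool.false_or]
      rw [pvStepA_getD, PySem.Dict.getD_insert_of_ne _ _ _ (fun hh => h hh.symm)]

theorem pvStep2_keys (acc : PySem.Dict String (PySem.Set String)) (row : String × List String) :
    (pvStep2 acc row).keys = PySem.Set.update acc.keys row.2 := by
  unfold pvStep2
  rw [pvStepA_funext]
  rw [PySem.Dict.keys_foldl_insert_key (row.2.map (fun r => (r, row.1))) Prod.fst
    (fun d pr => PySem.Set.add (d.getD pr.1 PySem.Set.empty) pr.2) acc]
  simp [List.map_map, Function.comp_def]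

theorem pvStep2_nodup (acc : PySem.Dict String (PySem.Set String)) (row : String × List String)
    (h : acc.keys.Nodup) : (pvStep2 acc row).keys.Nodup := by
  unfold pvStep2
  rw [pvStepA_funext]
  exact PySem.Dict.nodup_keys_foldl_insert_key (row.2.map (fun r => (r, row.1))) Prod.fst
    (fun d pr => PySem.Set.add (d.getD pr.1 PySem.Set.empty) pr.2) acc h

-- OUTER lemmas: the whole grouping fold, characterised per key / per key-set.
theorem pvGroup_getD (r : String) : ∀ (rows : List (String × List String)) (d : PySem.Dict String (PySem.Set String)),
    (rows.foldl pvStep2 d).getD r PySem.Set.empty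
      = rows.foldl (fun s row => if row.2.contains r then PySem.Set.add s row.1 else s) (d.getD r PySem.Set.empty) := by
  intro rows
  induction rows with
  | nil => intro d; rfl
  | cons row rest ih =>
    intro d
    simp only [List.foldl_cons]
    rw [ih, pvStep2_getD]

theorem pvGroup_keys : ∀ (rows : List (String × List String)) (d : PySem.Dict String (PySem.Set String)),
    (rows.foldl pvStep2 d).keys = rows.foldl (fun s row => PySem.Set.update s row.2) d.keys := by
  intro rows
  induction rows with
  | nil => intro d; rfl
  | cons row rest ih =>
    intro d
    simp only [List.foldl_cons]
    rw [ih, pvStep2_keys]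

theorem pvGroup_nodup : ∀ (rows : List (String × List String)) (d : PySem.Dict String (PySem.Set String)),
    d.keys.Nodup → (rows.foldl pvStep2 d).keys.Nodup := by
  intro rows
  induction rows with
  | nil => intro d h; exact h
  | cons row rest ih =>
    intro d h
    exact ih _ (pvStep2_nodup d row h)

-- Rows with an empty repo list are no-ops for any row fold that ignores them.
theorem pvFoldFilter {β : Type} (f : β → String × List String → β)
    (hf : ∀ (b : β) (row : String × List String), row.2 = [] → f b row = b) :
    ∀ (l : List (String × List String)) (init : β),
      ((l.filter (fun row => decide (row.2 ≠ []))).foldl f init) = l.foldl f init := by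
  intro l
  induction l with
  | nil => intro init; rfl
  | cons row rest ih =>
    intro init
    rw [List.filter_cons]
    by_cases h : row.2 = []
    · rw [if_neg (by simp [h]), ih, List.foldl_cons, hf init row h]
    · rw [if_pos (by simp [h])]
      simp only [List.foldl_cons]
      exact ih _

-- The repo-order accumulator stays duplicate-free.
theorem pvOrder_nodup : ∀ (rows : List (String × List String)) (s : PySem.Set String),
    s.Nodup → (rows.foldl (fun ord row => PySem.Set.update ord row.2) s).Nodup := by
  intro rows
  induction rows with
  | nil => intro s h; exact h
  | cons row rest ih =>
    intro s h
    exact ih _ (PySem.Set.nodup_update s row.2 h)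

-- ===== VERDICT (by name: the statement is the Claim_ definition above) =====
theorem constructRepoToUserIdsMap_spec : Claim_equal_constructRepoToUserIdsMap := by
  intro u e _ _
  unfold Spec_constructRepoToUserIdsMap constructRepoToUserIdsMap constructRepoToUserIdsMap_alt
  dsimp only
  -- A side: iterate over items, reduce the inner loop to pvStep2 over the (userId, repos) row
  rw [show (PySem.Dict.ofList u).keys = (PySem.Dict.ofList u).items.map Prod.fst from rfl,
      List.foldl_map]
  rw [PySem.List.foldl_congr_mem _ _
        (fun acc (p : String × List String) =>
          pvStep2 acc (((PySem.Dict.ofList e).getD p.1 ""), pvToks p.2)) _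
        (fun acc p hp => by
          rw [PySem.Dict.getD_of_mem_items _ hp (PySem.Dict.nodup_keys_ofList u) []]
          show List.foldl (fun acc tok =>
              if PySem.Chars.strip tok ≠ [] then
                pvStepA acc (String.ofList (PySem.Chars.strip tok), (PySem.Dict.ofList e).getD p.1 "")
              else acc) acc
            (PySem.Chars.splitOn
              ((if PySem.List.pyGetD p.2 0 "" ≠ "" then PySem.List.pyGetD p.2 0 "" ++ ","
                  else PySem.List.pyGetD p.2 0 "") ++ PySem.List.pyGetD p.2 1 "").toList [',']) = _
          rw [String.toList_append, pvInnerA, pvPairs_csv]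
          unfold pvStep2
          rw [pvPairs_eq_map]
          unfold pvToks
          simp only [String.toList_append, show ("," : String).toList = [','] from rfl,
            List.append_assoc, List.singleton_append])]
  -- B side: rows is the filtered row list
  rw [PySem.List.foldl_congr_mem (PySem.Dict.ofList u).items _
        (fun rs (p : String × List String) =>
          if decide (pvToks p.2 ≠ []) = true then rs ++ [(((PySem.Dict.ofList e).getD p.1 ""), pvToks p.2)] else rs) []
        (fun rs p _ => by by_cases h : pvToks p.2 ≠ [] <;> simp [h])]
  rw [PySem.List.foldl_append_if (fun (p : String × List String) => decide (pvToks p.2 ≠ []))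
        (fun p => (((PySem.Dict.ofList e).getD p.1 ""), pvToks p.2)) (PySem.Dict.ofList u).items []]
  rw [List.nil_append]
  have hfilt : (((PySem.Dict.ofList u).items.filter (fun p => decide (pvToks p.2 ≠ []))).map
        (fun p => (((PySem.Dict.ofList e).getD p.1 ""), pvToks p.2)))
      = (((PySem.Dict.ofList u).items.map
            (fun p => (((PySem.Dict.ofList e).getD p.1 ""), pvToks p.2))).filter
          (fun row => decide (row.2 ≠ []))) := by
    simp [List.filter_map, Function.comp_def]
  rw [hfilt]
  set rowsAll := (PySem.Dict.ofList u).items.map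
    (fun p => (((PySem.Dict.ofList e).getD p.1 ""), pvToks p.2)) with hrowsAll
  -- fold over rowsAll instead of its filtered form, everywhere
  have hOrd : ((rowsAll.filter (fun row => decide (row.2 ≠ []))).foldl
        (fun ord row => PySem.Set.update ord row.2) PySem.Set.empty)
      = rowsAll.foldl (fun ord row => PySem.Set.update ord row.2) PySem.Set.empty :=
    pvFoldFilter _ (fun b row h => by simp [h, PySem.Set.update]) rowsAll PySem.Set.empty
  have hSet : ∀ repo : String,
      ((rowsAll.filter (fun row => decide (row.2 ≠ []))).foldl
          (fun s row => if row.2.contains repo then PySem.Set.add s row.1 else s) PySem.Set.empty)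
        = rowsAll.foldl (fun s row => if row.2.contains repo then PySem.Set.add s row.1 else s) PySem.Set.empty :=
    fun repo => pvFoldFilter _ (fun b row h => by simp [h]) rowsAll PySem.Set.empty
  rw [hOrd]
  rw [show (List.foldl (fun acc (p : String × List String) =>
        pvStep2 acc (((PySem.Dict.ofList e).getD p.1 ""), pvToks p.2)) PySem.Dict.empty
        (PySem.Dict.ofList u).items) = List.foldl pvStep2 PySem.Dict.empty rowsAll from by
      rw [hrowsAll, List.foldl_map]]
  -- rewrite left side via the grouping characterisation
  have hA : (rowsAll.foldl pvStep2 PySem.Dict.empty).items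
      = (rowsAll.foldl (fun s row => PySem.Set.update s row.2) PySem.Set.empty).map
          (fun r => (r, rowsAll.foldl
            (fun s row => if row.2.contains r then PySem.Set.add s row.1 else s) PySem.Set.empty)) := by
    rw [PySem.Dict.items_eq_map_keys _
        (pvGroup_nodup rowsAll PySem.Dict.empty (by simp [PySem.Dict.keys_empty])) PySem.Set.empty]
    rw [pvGroup_keys]
    refine List.map_congr_left ?_
    intro r _
    rw [pvGroup_getD]
    rfl
  -- rewrite right side via the fresh-insert characterisation
  have hB : ((rowsAll.foldl (fun s row => PySem.Set.update s row.2) PySem.Set.empty).foldl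
        (fun d repo => d.insert repo
          ((rowsAll.filter (fun row => decide (row.2 ≠ []))).foldl
            (fun s row => if row.2.contains repo then PySem.Set.add s row.1 else s) PySem.Set.empty))
        PySem.Dict.empty).items
      = (rowsAll.foldl (fun s row => PySem.Set.update s row.2) PySem.Set.empty).map
          (fun r => (r, rowsAll.foldl
            (fun s row => if row.2.contains r then PySem.Set.add s row.1 else s) PySem.Set.empty)) := by
    rw [PySem.Dict.items_foldl_insert_fresh _ (fun repo => repo)
        (fun repo => (rowsAll.filter (fun row => decide (row.2 ≠ []))).foldl
          (fun s row => if row.2.contains repo then PySem.Set.add s row.1 else s) PySem.Set.empty)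
        PySem.Dict.empty (fun a _ => PySem.Dict.contains_empty a)
        (by
          rw [List.map_id']
          exact pvOrder_nodup rowsAll PySem.Set.empty List.nodup_nil)]
    simp only [show (PySem.Dict.empty : PySem.Dict String (PySem.Set String)).items = [] from rfl, List.nil_append]
    refine List.map_congr_left ?_
    intro r _
    rw [hSet]
  rw [hA]
  exact hB.symm
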